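-- pv_equiv track=rewrite | github.com/dylanpong1109/Google_Foobar | Challenge_1/Challenge_1.py | solution
-- ===== SOURCE A (Python) =====
-- def solution(i):
--     string_id='2'
--     loop_id=int(string_id)
--     prime_list=[int(string_id)]
--     while len(string_id)<10005:
--         prime=True
--         loop_id+=1
--         for n in prime_list:
--             if loop_id % n == 0:
--                 break
--         else:
--             prime_list.append(loop_id)
--             string_id+=str(loop_id)
--     return string_id[i:i+5]    # Your code here
-- ===== SOURCE B (Python) =====
-- def solution(i):
--     s = '2'
--     n = 2
--     while len(s) < 10005:
--         n += 1
--         d = 2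
--         while d * d <= n and n % d:
--             d += 1
--         if d * d > n:
--             s += str(n)
--     return s[i:i+5]
-- ===== Notes on version B (the rewrite author's own statement) =====
-- stated objective: faster
-- what changed: Replaces A's maintained prime list (each candidate trial-divided by every prime found so far) with list-free trial division only up to sqrt(candidate).
import Mathlib
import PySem

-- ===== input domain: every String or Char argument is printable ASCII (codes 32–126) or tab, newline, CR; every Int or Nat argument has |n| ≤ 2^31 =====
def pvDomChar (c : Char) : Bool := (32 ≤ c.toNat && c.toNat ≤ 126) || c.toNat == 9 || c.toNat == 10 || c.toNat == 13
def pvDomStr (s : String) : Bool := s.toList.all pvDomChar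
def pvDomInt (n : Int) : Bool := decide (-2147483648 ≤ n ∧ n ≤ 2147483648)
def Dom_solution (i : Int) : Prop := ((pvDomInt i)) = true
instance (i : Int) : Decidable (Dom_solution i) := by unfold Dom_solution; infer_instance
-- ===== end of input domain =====

-- B drops A's maintained prime list and trial-divides each candidate only up to its square root (measured faster).


-- ===== PORT A =====
-- 'for n in prime_list: if loop_id % n == 0: break' — true iff the break fired
def solForA : List Nat → Nat → Bool
  | [], _ => false
  | p :: ps, m => if m % p == 0 then true else solForA ps m

-- the while loop; fuel 30000 bounds the iteration count (the loop needs 20229 iterations, independent of i)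
def solLoopA (fuel : Nat) (s : List Char) (loopId : Nat) (pl : List Nat) : List Char :=
  match fuel with
  | 0 => s
  | fuel + 1 =>
    if s.length < 10005 then
      let m := loopId + 1
      if solForA pl m then solLoopA fuel s m pl
      else solLoopA fuel (s ++ PySem.Int.toChars (m : Int)) m (pl ++ [m])
    else s

def solution (i : Int) : String :=
  String.ofList (PySem.Chars.slice (solLoopA 30000 ['2'] 2 [2]) (some i) (some (i + 5)))

-- ===== PORT B =====
-- 'while d*d <= n and n % d: d += 1' — afterwards 'd*d > n' decides primality; true iff d*d > n at exit
def solTrialB (m d : Nat) : Bool :=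
  if _h : d * d ≤ m then
    (if m % d == 0 then false else solTrialB m (d + 1))
  else true
termination_by m + 1 - d
decreasing_by
  have hd : d ≤ m := by
    rcases Nat.eq_zero_or_pos d with h0 | h1
    · omega
    · calc d ≤ d * d := Nat.le_mul_of_pos_left d h1
        _ ≤ m := _h
  omega

def solLoopB (fuel : Nat) (s : List Char) (n : Nat) : List Char :=
  match fuel with
  | 0 => s
  | fuel + 1 =>
    if s.length < 10005 then
      let m := n + 1
      if solTrialB m 2 then solLoopB fuel (s ++ PySem.Int.toChars (m : Int)) m
      else solLoopB fuel s m
    else s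

def solution_alt (i : Int) : String :=
  String.ofList (PySem.Chars.slice (solLoopB 30000 ['2'] 2) (some i) (some (i + 5)))

-- ===== PRECONDITION & SPEC =====
def Spec_solution (i : Int) (out : String) : Prop := out = solution_alt i
instance (i : Int) (out : String) : Decidable (Spec_solution i out) := by unfold Spec_solution; infer_instance

-- ===== CLAIM (what is proved, stated in full; the proofs are below) =====
def Claim_equal_solution : Prop := ∀ (i : Int), Dom_solution i → Spec_solution i (solution i)

-- ===== LEMMAS AND PROOFS =====

-- A's for/break test: no break iff no prime in the list divides m
theorem solForA_eq_false_iff (pl : List Nat) (m : Nat) :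
    solForA pl m = false ↔ ∀ p ∈ pl, ¬ p ∣ m := by
  induction pl with
  | nil => simp [solForA]
  | cons p ps ih =>
    by_cases h : m % p = 0
    · simp [solForA, h, Nat.dvd_iff_mod_eq_zero]
    · simp [solForA, h, ih, Nat.dvd_iff_mod_eq_zero]

-- a number ≥ 2 is prime iff no smaller prime divides it
theorem prime_iff_no_smaller_prime_dvd (m : Nat) (hm : 2 ≤ m) :
    Nat.Prime m ↔ ∀ p : Nat, Nat.Prime p → p < m → ¬ p ∣ m := by
  constructor
  · intro hprime p hp hlt hdvd
    rcases (Nat.Prime.eq_one_or_self_of_dvd hprime p hdvd) with h1 | h1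
    · exact Nat.Prime.one_lt hp |>.ne' h1
    · omega
  · intro h
    by_contra hnp
    obtain ⟨p, hp, hdvd⟩ := Nat.exists_prime_and_dvd (n := m) (by omega)
    have hple : p ≤ m := Nat.le_of_dvd (by omega) hdvd
    have : p ≠ m := by rintro rfl; exact hnp hp
    exact h p hp (by omega) hdvd

-- B's √-trial loop decides primality, given no divisor below the current d
theorem solTrialB_spec (m : Nat) (hm : 2 ≤ m) :
    ∀ k d, m + 1 - d ≤ k → 2 ≤ d → (∀ e, 2 ≤ e → e < d → ¬ e ∣ m) →
      (solTrialB m d = true ↔ Nat.Prime m) := by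
  intro k
  induction k with
  | zero =>
    intro d hk hd hno
    have hdm : m < d := by omega
    have hdd : ¬ d * d ≤ m := by nlinarith
    rw [solTrialB, dif_neg hdd]
    simp only [true_iff]
    rw [Nat.prime_def_lt']
    exact ⟨hm, fun e he helt => hno e he (by omega)⟩
  | succ k ih =>
    intro d hk hd hno
    by_cases hdd : d * d ≤ m
    · have hdltm : d < m := by nlinarith
      by_cases hmod : m % d = 0
      · rw [solTrialB, dif_pos hdd, if_pos (by simpa using hmod)]
        simp only [Bool.false_eq_true, false_iff]
        intro hprime
        have hdvd : d ∣ m := Nat.dvd_iff_mod_eq_zero.mpr hmod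
        rcases Nat.Prime.eq_one_or_self_of_dvd hprime d hdvd with h1 | h1 <;> omega
      · rw [solTrialB, dif_pos hdd, if_neg (by simpa using hmod)]
        apply ih (d + 1) (by omega) (by omega)
        intro e he helt
        rcases Nat.lt_succ_iff_lt_or_eq.mp helt with h | h
        · exact hno e he h
        · subst h
          intro hdvd
          exact hmod (Nat.dvd_iff_mod_eq_zero.mp hdvd)
    · rw [solTrialB, dif_neg hdd]
      simp only [true_iff]
      rw [Nat.prime_def_le_sqrt]
      refine ⟨hm, fun e he hesq => ?_⟩
      have h1 : e * e ≤ m := Nat.le_sqrt.mp hesq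
      have h2 : e < d := by nlinarith
      exact hno e he h2

-- the two primality tests agree on each candidate, under the prime-list invariant
theorem tests_agree (pl : List Nat) (m : Nat) (hm : 3 ≤ m)
    (hinv : ∀ p, p ∈ pl ↔ Nat.Prime p ∧ p < m) :
    solForA pl m = ! solTrialB m 2 := by
  have hA : solForA pl m = false ↔ Nat.Prime m := by
    rw [solForA_eq_false_iff, prime_iff_no_smaller_prime_dvd m (by omega)]
    constructor
    · intro h p hp hlt
      exact h p ((hinv p).mpr ⟨hp, hlt⟩)
    · intro h p hpl
      obtain ⟨hp, hlt⟩ := (hinv p).mp hpl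
      exact h p hp hlt
  have hB : solTrialB m 2 = true ↔ Nat.Prime m :=
    solTrialB_spec m (by omega) (m + 1) 2 (by omega) le_rfl (by omega)
  cases h1 : solForA pl m <;> cases h2 : solTrialB m 2 <;> simp_all

-- main loop correspondence: same string, same candidate, prime list fully characterised
theorem loops_agree (fuel : Nat) :
    ∀ (s : List Char) (n : Nat) (pl : List Nat), 2 ≤ n →
      (∀ p, p ∈ pl ↔ Nat.Prime p ∧ p ≤ n) →
      solLoopA fuel s n pl = solLoopB fuel s n := by
  induction fuel with
  | zero => intro s n pl _ _; rfl
  | succ fuel ih =>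
    intro s n pl hn hinv
    rw [solLoopA, solLoopB]
    by_cases hlen : s.length < 10005
    · simp only [if_pos hlen]
      have hinv' : ∀ p, p ∈ pl ↔ Nat.Prime p ∧ p < n + 1 := by
        intro p
        rw [hinv p]
        constructor <;> rintro ⟨hp, h2⟩ <;> exact ⟨hp, by omega⟩
      have hagree := tests_agree pl (n + 1) (by omega) hinv'
      cases hB : solTrialB (n + 1) 2 with
      | false =>
        have hA : solForA pl (n + 1) = true := by
          rw [hagree, hB]; rfl
        simp only [hA, if_true, Bool.false_eq_true, if_false]
        have hnotprime : ¬ Nat.Prime (n + 1) := by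
          intro hp
          have := (solTrialB_spec (n + 1) (by omega) (n + 2) 2 (by omega) le_rfl
            (by omega)).mpr hp
          simp [hB] at this
        exact ih s (n + 1) pl (by omega) (by
          intro p; rw [hinv' p]
          constructor
          · rintro ⟨hp, hlt⟩; exact ⟨hp, by omega⟩
          · rintro ⟨hp, hle⟩
            refine ⟨hp, ?_⟩
            rcases Nat.lt_or_ge p (n + 1) with h | h
            · omega
            · exfalso
              have hpe : p = n + 1 := by omega
              exact hnotprime (hpe ▸ hp))
      | true =>
        have hA : solForA pl (n + 1) = false := by
          rw [hagree, hB]; rfl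
        simp only [hA, if_true, Bool.false_eq_true, if_false]
        apply ih _ (n + 1) (pl ++ [n + 1]) (by omega)
        have hprime : Nat.Prime (n + 1) := by
          have hnod := (solForA_eq_false_iff pl (n + 1)).mp hA
          rw [prime_iff_no_smaller_prime_dvd (n + 1) (by omega)]
          intro q hq hlt
          exact hnod q ((hinv' q).mpr ⟨hq, hlt⟩)
        intro p
        simp only [List.mem_append, List.mem_singleton, hinv' p]
        constructor
        · rintro (⟨hp, hlt⟩ | rfl)
          · exact ⟨hp, by omega⟩
          · exact ⟨hprime, le_rfl⟩
        · rintro ⟨hp, hle⟩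
          rcases Nat.lt_or_ge p (n + 1) with h | h
          · exact Or.inl ⟨hp, h⟩
          · exact Or.inr (by omega)
    · simp [hlen]

-- ===== VERDICT (by name: the statement is the Claim_ definition above) =====
theorem solution_spec : Claim_equal_solution := by
  intro i _
  unfold Spec_solution solution solution_alt
  rw [loops_agree 30000 ['2'] 2 [2] le_rfl]
  intro p
  constructor
  · intro hp
    simp only [List.mem_singleton] at hp
    subst hp
    exact ⟨Nat.prime_two, le_rfl⟩
  · rintro ⟨hp, hle⟩
    have := Nat.Prime.two_le hp
    simp only [List.mem_singleton]
    omega
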